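-- pv_equiv track=rewrite | github.com/tassieee/IEEEXtreme-18.0. | Rectangles and arrays.py | max_rectangle_area
-- ===== SOURCE A (Python) =====
-- def get_max_area_single_pass(heights):
--     n = len(heights)
--     # Use arrays instead of stack for better performance
--     left_smaller = [0] * n  # Index of nearest smaller element on left
--     right_smaller = [0] * n  # Index of nearest smaller element on right
--
--     # Find nearest smaller element on left
--     stack = []
--     for i in range(n):
--         while stack and heights[stack[-1]] >= heights[i]:
--             stack.pop()
--         left_smaller[i] = stack[-1] if stack else -1
--         stack.append(i)
--
--     # Find nearest smaller element on right
--     stack = []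
--     for i in range(n-1, -1, -1):
--         while stack and heights[stack[-1]] >= heights[i]:
--             stack.pop()
--         right_smaller[i] = stack[-1] if stack else n
--         stack.append(i)
--
--     # Calculate maximum area without any modification
--     max_area = 0
--     for i in range(n):
--         width = right_smaller[i] - left_smaller[i] - 1
--         area = width * heights[i]
--         max_area = max(max_area, area)
--
--     return max_area, left_smaller, right_smaller
--
-- def max_rectangle_area(heights, x):
--     n = len(heights)
--     # Get initial maximum area and boundary arrays
--     current_max, left_smaller, right_smaller = get_max_area_single_pass(heights)
--
--     # For each position, we only need to try meaningful height changes
--     for i in range(n):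
--         # Find the range this element affects
--         left = left_smaller[i]
--         right = right_smaller[i]
--
--         # Try setting to X if it can form a larger rectangle
--         if x > heights[i]:
--             # Calculate potential width of rectangle
--             potential_left = i
--             potential_right = i
--
--             # Expand left while maintaining minimum height
--             j = i - 1
--             while j > left and heights[j] >= x:
--                 potential_left = j
--                 j -= 1
--
--             # Expand right while maintaining minimum height
--             j = i + 1
--             while j < right and heights[j] >= x:
--                 potential_right = j
--                 j += 1
--
--             # Calculate area with this modification
--             width = potential_right - potential_left + 1
--             area = width * x
--             current_max = max(current_max, area)
--
--         # If we're not at the edges, try matching neighbors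
--         if i > 0 and i < n-1:
--             neighbor_height = min(heights[i-1], heights[i+1])
--             if neighbor_height > heights[i] and neighbor_height <= x:
--                 width = 0
--                 # Calculate width of possible rectangle with neighbor height
--                 j = i
--                 while j >= 0 and heights[j] >= neighbor_height:
--                     width += 1
--                     j -= 1
--                 j = i + 1
--                 while j < n and heights[j] >= neighbor_height:
--                     width += 1
--                     j += 1
--                 area = width * neighbor_height
--                 current_max = max(current_max, area)
--
--     return current_max
-- ===== SOURCE B (Python) =====
-- def _run_left(heights, i, t):
--     c = 0
--     while i - c >= 0 and heights[i - c] >= t: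
--         c += 1
--     return c
--
-- def _run_right(heights, i, t):
--     n = len(heights)
--     c = 0
--     while i + c < n and heights[i + c] >= t:
--         c += 1
--     return c
--
-- def max_rectangle_area(heights, x):
--     n = len(heights)
--     best = 0
--     for i in range(n):
--         h = heights[i]
--         best = max(best, (_run_left(heights, i - 1, h) + 1 + _run_right(heights, i + 1, h)) * h)
--         if x > h:
--             best = max(best, (_run_left(heights, i - 1, x) + 1 + _run_right(heights, i + 1, x)) * x)
--     return best
-- ===== Notes on version B (the rewrite author's own statement) =====
-- stated objective: simpler
-- what changed: B drops A's two monotonic-stack passes, the nearest-smaller boundary arrays, the bounded expansion loops and the whole neighbour-matching branch (whose candidate is provably always dominated by the base maximum), computing each candidate area from direct left/right run-length scans around the current bar.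
import Mathlib
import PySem

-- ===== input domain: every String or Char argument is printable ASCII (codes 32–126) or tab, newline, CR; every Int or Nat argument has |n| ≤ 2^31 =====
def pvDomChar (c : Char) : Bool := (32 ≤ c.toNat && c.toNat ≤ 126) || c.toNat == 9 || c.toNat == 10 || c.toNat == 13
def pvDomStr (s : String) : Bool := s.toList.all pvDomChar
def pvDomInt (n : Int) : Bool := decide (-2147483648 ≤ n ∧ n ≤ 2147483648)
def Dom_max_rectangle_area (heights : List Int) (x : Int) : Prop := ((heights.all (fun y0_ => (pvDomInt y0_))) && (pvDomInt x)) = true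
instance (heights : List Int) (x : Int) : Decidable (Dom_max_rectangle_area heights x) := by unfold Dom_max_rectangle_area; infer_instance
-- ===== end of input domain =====

-- B replaces A's two monotonic-stack passes, boundary arrays and bounded expansion loops by direct
-- left/right run-length scans around each bar, and drops A's neighbour-matching branch altogether
-- (its candidate is proved below to never exceed the base maximum): shorter and plainer, same cost.

-- ===== PORT A =====
-- the inner `while stack and heights[stack[-1]] >= heights[i]: stack.pop()` loop (stack top = list head)
def pvPop (heights : List Int) (v : Int) : List Int → List Int
  | [] => []
  | t :: r => if PySem.List.pyGetD heights t 0 ≥ v then pvPop heights v r else t :: r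

-- one iteration of the left-to-right pass (records `stack[-1] if stack else -1`, then pushes i)
def pvStepL (heights : List Int) (st : List Int × List Int) (i : Int) : List Int × List Int :=
  let s := pvPop heights (PySem.List.pyGetD heights i 0) st.1
  (i :: s, st.2 ++ [s.headD (-1)])

-- one iteration of the right-to-left pass (records `stack[-1] if stack else n`)
def pvStepR (heights : List Int) (n : Int) (st : List Int × List Int) (i : Int) : List Int × List Int :=
  let s := pvPop heights (PySem.List.pyGetD heights i 0) st.1
  (i :: s, st.2 ++ [s.headD n])

def pvGetMaxAreaSinglePass (heights : List Int) : Int × List Int × List Int :=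
  let n := heights.length
  let ls := ((PySem.List.pyRange 0 n 1).foldl (pvStepL heights) ([], [])).2
  -- range(n-1,-1,-1) visits the same indices as range(n) reversed; right_smaller[i] is the
  -- value recorded when i was processed, so the collected outputs are reversed back into index order
  let rs := (((PySem.List.pyRange 0 n 1).reverse).foldl (pvStepR heights n) ([], [])).2.reverse
  let m := (PySem.List.pyRange 0 n 1).foldl (fun m i =>
      max m ((PySem.List.pyGetD rs i 0 - PySem.List.pyGetD ls i 0 - 1) * PySem.List.pyGetD heights i 0)) 0
  (m, ls, rs)

-- `while j > left and heights[j] >= x: potential_left = j; j -= 1` (fuel ≥ number of iterations)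
def pvExpandL (heights : List Int) (x left : Int) : Nat → Int → Int → Int
  | 0, _, pl => pl
  | f+1, j, pl =>
    if j > left ∧ PySem.List.pyGetD heights j 0 ≥ x then pvExpandL heights x left f (j-1) j else pl

def pvExpandR (heights : List Int) (x right : Int) : Nat → Int → Int → Int
  | 0, _, pr => pr
  | f+1, j, pr =>
    if j < right ∧ PySem.List.pyGetD heights j 0 ≥ x then pvExpandR heights x right f (j+1) j else pr

-- `while j >= 0 and heights[j] >= t: width += 1; j -= 1`
def pvCountL (heights : List Int) (t : Int) : Nat → Int → Int → Int
  | 0, _, w => w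
  | f+1, j, w =>
    if j ≥ 0 ∧ PySem.List.pyGetD heights j 0 ≥ t then pvCountL heights t f (j-1) (w+1) else w

-- `while j < n and heights[j] >= t: width += 1; j += 1`
def pvCountR (heights : List Int) (t n : Int) : Nat → Int → Int → Int
  | 0, _, w => w
  | f+1, j, w =>
    if j < n ∧ PySem.List.pyGetD heights j 0 ≥ t then pvCountR heights t n f (j+1) (w+1) else w

def max_rectangle_area (heights : List Int) (x : Int) : Int :=
  let n := heights.length
  let r := pvGetMaxAreaSinglePass heights
  let ls := r.2.1
  let rs := r.2.2
  (PySem.List.pyRange 0 n 1).foldl (fun cur i =>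
    let left := PySem.List.pyGetD ls i 0
    let right := PySem.List.pyGetD rs i 0
    let hi := PySem.List.pyGetD heights i 0
    let cur1 :=
      if x > hi then
        let pl := pvExpandL heights x left n (i-1) i
        let pr := pvExpandR heights x right n (i+1) i
        max cur ((pr - pl + 1) * x)
      else cur
    if 0 < i ∧ i < (n : Int) - 1 then
      let nh := min (PySem.List.pyGetD heights (i-1) 0) (PySem.List.pyGetD heights (i+1) 0)
      if nh > hi ∧ nh ≤ x then
        let w := pvCountL heights nh (n+1) i 0
        let w2 := pvCountR heights nh n (n+1) (i+1) w
        max cur1 (w2 * nh)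
      else cur1
    else cur1) r.1

-- ===== PORT B =====
-- `while i - c >= 0 and heights[i - c] >= t: c += 1`
def altRunL (heights : List Int) (t i : Int) : Nat → Int → Int
  | 0, c => c
  | f+1, c =>
    if i - c ≥ 0 ∧ PySem.List.pyGetD heights (i - c) 0 ≥ t then altRunL heights t i f (c+1) else c

-- `while i + c < n and heights[i + c] >= t: c += 1`
def altRunR (heights : List Int) (t i : Int) : Nat → Int → Int
  | 0, c => c
  | f+1, c =>
    if i + c < (heights.length : Int) ∧ PySem.List.pyGetD heights (i + c) 0 ≥ t then altRunR heights t i f (c+1) else c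

def max_rectangle_area_alt (heights : List Int) (x : Int) : Int :=
  let n := heights.length
  (PySem.List.pyRange 0 n 1).foldl (fun best i =>
    let h := PySem.List.pyGetD heights i 0
    let b1 := max best ((altRunL heights h (i-1) (n+1) 0 + 1 + altRunR heights h (i+1) (n+1) 0) * h)
    if x > h then
      max b1 ((altRunL heights x (i-1) (n+1) 0 + 1 + altRunR heights x (i+1) (n+1) 0) * x)
    else b1) 0

-- ===== PRECONDITION & SPEC =====
def Spec_max_rectangle_area (heights : List Int) (x : Int) (out : Int) : Prop := out = max_rectangle_area_alt heights x
instance (heights : List Int) (x : Int) (out : Int) : Decidable (Spec_max_rectangle_area heights x out) := by unfold Spec_max_rectangle_area; infer_instance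

-- ===== CLAIM (what is proved, stated in full; the proofs are below) =====
def Claim_equal_max_rectangle_area : Prop := ∀ (heights : List Int) (x : Int), Dom_max_rectangle_area heights x → Spec_max_rectangle_area heights x (max_rectangle_area heights x)

-- ===== LEMMAS AND PROOFS =====

-- nearest strictly-smaller to the left (value of left_smaller[i])
def IsNSL (hts : List Int) (i L : Int) : Prop :=
  -1 ≤ L ∧ L < i ∧ (∀ k, L < k → k < i → PySem.List.pyGetD hts i 0 ≤ PySem.List.pyGetD hts k 0) ∧
    (L = -1 ∨ PySem.List.pyGetD hts L 0 < PySem.List.pyGetD hts i 0)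

-- nearest strictly-smaller to the right (value of right_smaller[i])
def IsNSR (hts : List Int) (i R : Int) : Prop :=
  i < R ∧ R ≤ (hts.length : Int) ∧ (∀ k, i < k → k < R → PySem.List.pyGetD hts i 0 ≤ PySem.List.pyGetD hts k 0) ∧
    (R = (hts.length : Int) ∨ PySem.List.pyGetD hts R 0 < PySem.List.pyGetD hts i 0)

-- left boundary of the run of bars ≥ t ending at s
def LBnd (hts : List Int) (t s b : Int) : Prop :=
  -1 ≤ b ∧ b ≤ s ∧ (∀ k, b < k → k ≤ s → t ≤ PySem.List.pyGetD hts k 0) ∧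
    (b = -1 ∨ PySem.List.pyGetD hts b 0 < t)

-- right boundary of the run of bars ≥ t starting at s
def RBnd (hts : List Int) (t s b : Int) : Prop :=
  s ≤ b ∧ b ≤ (hts.length : Int) ∧ (∀ k, s ≤ k → k < b → t ≤ PySem.List.pyGetD hts k 0) ∧
    (b = (hts.length : Int) ∨ PySem.List.pyGetD hts b 0 < t)

lemma exists_LBnd_aux (hts : List Int) (t : Int) :
    ∀ m : Nat, ∀ s : Int, (s+1).toNat = m → -1 ≤ s → ∃ b, LBnd hts t s b := by
  intro m
  induction m with
  | zero =>
    intro s hm hs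
    refine ⟨-1, by norm_num, by omega, fun k hk1 hk2 => absurd (lt_of_lt_of_le hk1 hk2) (by omega), Or.inl rfl⟩
  | succ m ih =>
    intro s hm hs
    have hs0 : 0 ≤ s := by omega
    by_cases hlt : PySem.List.pyGetD hts s 0 < t
    · exact ⟨s, by omega, le_refl s, fun k hk1 hk2 => absurd (lt_of_lt_of_le hk1 hk2) (lt_irrefl _), Or.inr hlt⟩
    · obtain ⟨b, hb1, hb2, hb3, hb4⟩ := ih (s-1) (by omega) (by omega)
      refine ⟨b, hb1, by omega, fun k hk1 hk2 => ?_, hb4⟩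
      rcases lt_or_ge k s with h | h
      · exact hb3 k hk1 (by omega)
      · have : k = s := by omega
        subst this; omega

lemma exists_LBnd (hts : List Int) (t s : Int) (h1 : -1 ≤ s) : ∃ b, LBnd hts t s b :=
  exists_LBnd_aux hts t (s+1).toNat s rfl h1

lemma exists_RBnd_aux (hts : List Int) (t : Int) :
    ∀ m : Nat, ∀ s : Int, ((hts.length : Int) - s).toNat = m → s ≤ (hts.length : Int) → ∃ b, RBnd hts t s b := by
  intro m
  induction m with
  | zero =>
    intro s hm hs
    have : s = (hts.length : Int) := by omega
    subst this
    exact ⟨(hts.length : Int), le_refl _, le_refl _, fun k hk1 hk2 => absurd (lt_of_le_of_lt hk1 hk2) (lt_irrefl _), Or.inl rfl⟩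
  | succ m ih =>
    intro s hm hs
    have hslen : s < (hts.length : Int) := by omega
    by_cases hlt : PySem.List.pyGetD hts s 0 < t
    · exact ⟨s, le_refl s, by omega, fun k hk1 hk2 => absurd (lt_of_le_of_lt hk1 hk2) (lt_irrefl _), Or.inr hlt⟩
    · obtain ⟨b, hb1, hb2, hb3, hb4⟩ := ih (s+1) (by omega) (by omega)
      refine ⟨b, by omega, hb2, fun k hk1 hk2 => ?_, hb4⟩
      rcases lt_or_ge s k with h | h
      · exact hb3 k (by omega) hk2
      · have : k = s := by omega
        subst this; omega

lemma exists_RBnd (hts : List Int) (t s : Int) (h2 : s ≤ (hts.length : Int)) : ∃ b, RBnd hts t s b :=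
  exists_RBnd_aux hts t ((hts.length : Int) - s).toNat s rfl h2

lemma altRunL_run (hts : List Int) (t i b : Int) (hb : LBnd hts t i b) :
    ∀ (f : Nat) (c : Int), 0 ≤ c → c ≤ i - b → (i - b - c).toNat < f →
      altRunL hts t i f c = i - b := by
  obtain ⟨hb1, hb2, hb3, hb4⟩ := hb
  intro f
  induction f with
  | zero => intro c _ _ hf; exact absurd hf (Nat.not_lt_zero _)
  | succ f ih =>
    intro c hc0 hcb hf
    rcases eq_or_lt_of_le hcb with hstop | hgo
    · have hidx : i - c = b := by omega
      have hneg : ¬(i - c ≥ 0 ∧ PySem.List.pyGetD hts (i - c) 0 ≥ t) := by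
        rw [hidx]; rcases hb4 with h | h
        · intro hcontra; omega
        · intro hcontra; omega
      rw [altRunL, if_neg hneg]; omega
    · have hk : t ≤ PySem.List.pyGetD hts (i - c) 0 := hb3 (i - c) (by omega) (by omega)
      rw [altRunL, if_pos ⟨by omega, hk⟩]
      exact ih (c+1) (by omega) (by omega) (by omega)

lemma altRunR_run (hts : List Int) (t i b : Int) (hb : RBnd hts t i b) :
    ∀ (f : Nat) (c : Int), 0 ≤ c → i + c ≤ b → (b - i - c).toNat < f →
      altRunR hts t i f c = b - i := by
  obtain ⟨hb1, hb2, hb3, hb4⟩ := hb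
  intro f
  induction f with
  | zero => intro c _ _ hf; exact absurd hf (Nat.not_lt_zero _)
  | succ f ih =>
    intro c hc0 hcb hf
    rcases eq_or_lt_of_le hcb with hstop | hgo
    · have hidx : i + c = b := by omega
      have hneg : ¬(i + c < (hts.length : Int) ∧ PySem.List.pyGetD hts (i + c) 0 ≥ t) := by
        rw [hidx]; rcases hb4 with h | h
        · intro hcontra; omega
        · intro hcontra; omega
      rw [altRunR, if_neg hneg]; omega
    · have hk : t ≤ PySem.List.pyGetD hts (i + c) 0 := hb3 (i + c) (by omega) (by omega)
      rw [altRunR, if_pos ⟨by omega, hk⟩]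
      exact ih (c+1) (by omega) (by omega) (by omega)

lemma pvExpandL_run (hts : List Int) (x L b : Int) (hLb : L ≤ b)
    (hstop : b = L ∨ PySem.List.pyGetD hts b 0 < x) :
    ∀ (f : Nat) (j : Int), b ≤ j → (∀ k, b < k → k ≤ j → x ≤ PySem.List.pyGetD hts k 0) →
      (j - b).toNat < f → pvExpandL hts x L f j (j+1) = b + 1 := by
  intro f
  induction f with
  | zero => intro j _ _ hf; exact absurd hf (Nat.not_lt_zero _)
  | succ f ih =>
    intro j hbj hup hf
    rcases eq_or_lt_of_le hbj with heq | hgo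
    · subst heq
      have hneg : ¬(b > L ∧ PySem.List.pyGetD hts b 0 ≥ x) := by
        rcases hstop with h | h
        · intro hcontra; omega
        · intro hcontra; omega
      rw [pvExpandL, if_neg hneg]
    · have hk : x ≤ PySem.List.pyGetD hts j 0 := hup j hgo (le_refl j)
      rw [pvExpandL, if_pos ⟨by omega, hk⟩]
      have := ih (j-1) (by omega) (fun k h1 h2 => hup k h1 (by omega)) (by omega)
      simpa using this

lemma pvExpandR_run (hts : List Int) (x R b : Int) (hbR : b ≤ R)
    (hstop : b = R ∨ PySem.List.pyGetD hts b 0 < x) :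
    ∀ (f : Nat) (j : Int), j ≤ b → (∀ k, j ≤ k → k < b → x ≤ PySem.List.pyGetD hts k 0) →
      (b - j).toNat < f → pvExpandR hts x R f j (j-1) = b - 1 := by
  intro f
  induction f with
  | zero => intro j _ _ hf; exact absurd hf (Nat.not_lt_zero _)
  | succ f ih =>
    intro j hjb hup hf
    rcases eq_or_lt_of_le hjb with heq | hgo
    · have heq' : b = j := heq.symm
      subst heq'
      have hneg : ¬(b < R ∧ PySem.List.pyGetD hts b 0 ≥ x) := by
        rcases hstop with h | h
        · intro hcontra; omega
        · intro hcontra; omega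
      rw [pvExpandR, if_neg hneg]
    · have hk : x ≤ PySem.List.pyGetD hts j 0 := hup j (le_refl j) hgo
      rw [pvExpandR, if_pos ⟨by omega, hk⟩]
      have := ih (j+1) (by omega) (fun k h1 h2 => hup k (by omega) h2) (by omega)
      simpa using this

lemma pvCountR_run (hts : List Int) (t b : Int)
    (hlen : b ≤ (hts.length : Int)) (hstop : b = (hts.length : Int) ∨ PySem.List.pyGetD hts b 0 < t) :
    ∀ (f : Nat) (j w : Int), j ≤ b → (∀ k, j ≤ k → k < b → t ≤ PySem.List.pyGetD hts k 0) →
      (b - j).toNat < f → pvCountR hts t (hts.length : Int) f j w = w + (b - j) := by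
  intro f
  induction f with
  | zero => intro j w _ _ hf; exact absurd hf (Nat.not_lt_zero _)
  | succ f ih =>
    intro j w hjb hup hf
    rcases eq_or_lt_of_le hjb with heq | hgo
    · have heq' : b = j := heq.symm
      subst heq'
      have hneg : ¬(b < (hts.length : Int) ∧ PySem.List.pyGetD hts b 0 ≥ t) := by
        rcases hstop with h | h
        · intro hcontra; omega
        · intro hcontra; omega
      rw [pvCountR, if_neg hneg]; omega
    · have hk : t ≤ PySem.List.pyGetD hts j 0 := hup j (le_refl j) hgo
      rw [pvCountR, if_pos ⟨by omega, hk⟩]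
      have := ih (j+1) (w+1) (by omega) (fun k h1 h2 => hup k (by omega) h2) (by omega)
      omega

-- ---- the monotonic-stack passes compute nearest-smaller boundaries ----

lemma pvPop_decomp (hts : List Int) (v : Int) :
    ∀ s : List Int, ∃ pre, s = pre ++ pvPop hts v s ∧ ∀ j ∈ pre, v ≤ PySem.List.pyGetD hts j 0 := by
  intro s
  induction s with
  | nil => exact ⟨[], rfl, by simp⟩
  | cons t r ih =>
    by_cases h : PySem.List.pyGetD hts t 0 ≥ v
    · obtain ⟨pre, hpre, hall⟩ := ih
      refine ⟨t :: pre, ?_, ?_⟩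
      · rw [pvPop, if_pos h]; simpa using hpre
      · intro j hj
        rcases List.mem_cons.1 hj with h1 | h1
        · subst h1; exact h
        · exact hall j h1
    · refine ⟨[], ?_, by simp⟩
      rw [pvPop, if_neg h]; simp

lemma pvPop_head (hts : List Int) (v : Int) (s : List Int) :
    pvPop hts v s = [] ∨ ∃ t r, pvPop hts v s = t :: r ∧ PySem.List.pyGetD hts t 0 < v := by
  induction s with
  | nil => exact Or.inl rfl
  | cons t r ih =>
    by_cases h : PySem.List.pyGetD hts t 0 ≥ v
    · rw [pvPop, if_pos h]; exact ih
    · rw [pvPop, if_neg h]; exact Or.inr ⟨t, r, rfl, by omega⟩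

def StkL (hts : List Int) (i : Int) (s : List Int) : Prop :=
  (∀ j ∈ s, 0 ≤ j ∧ j < i) ∧ s.Pairwise (fun a b => b < a) ∧
    (∀ k, 0 ≤ k → k < i → k ∉ s →
      ∃ j ∈ s, k < j ∧ PySem.List.pyGetD hts j 0 ≤ PySem.List.pyGetD hts k 0)

def StkR (hts : List Int) (i : Int) (s : List Int) : Prop :=
  (∀ j ∈ s, i ≤ j ∧ j < (hts.length : Int)) ∧ s.Pairwise (fun a b => a < b) ∧
    (∀ k, i ≤ k → k < (hts.length : Int) → k ∉ s →
      ∃ j ∈ s, j < k ∧ PySem.List.pyGetD hts j 0 ≤ PySem.List.pyGetD hts k 0)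

lemma StkL_pop_IsNSL (hts : List Int) (i : Int) (s : List Int) (hinv : StkL hts i s) (h0 : 0 ≤ i) :
    IsNSL hts i ((pvPop hts (PySem.List.pyGetD hts i 0) s).headD (-1)) := by
  obtain ⟨hbnds, hpair, hcov⟩ := hinv
  obtain ⟨pre, hdec, hpre⟩ := pvPop_decomp hts (PySem.List.pyGetD hts i 0) s
  rcases pvPop_head hts (PySem.List.pyGetD hts i 0) s with hnil | ⟨t, r, hcons, hlt⟩
  · rw [hnil, List.headD_nil]
    refine ⟨le_refl _, by omega, fun k hk1 hk2 => ?_, Or.inl rfl⟩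
    rw [hnil, List.append_nil] at hdec
    by_cases hks : k ∈ s
    · exact hpre k (hdec ▸ hks)
    · obtain ⟨j, hj, hkj, hle⟩ := hcov k (by omega) hk2 hks
      exact le_trans (hpre j (hdec ▸ hj)) hle
  · rw [hcons, List.headD_cons]
    have hts_mem : t ∈ s := by rw [hdec, hcons]; simp
    have hbt := hbnds t hts_mem
    have hrlt : ∀ y ∈ r, y < t := by
      have := hdec ▸ hpair
      rw [hcons] at this
      exact (List.pairwise_cons.1 (List.pairwise_append.1 this).2.1).1
    refine ⟨by omega, hbt.2, fun k hk1 hk2 => ?_, Or.inr hlt⟩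
    by_cases hks : k ∈ s
    · rcases List.mem_append.1 (hdec ▸ hks) with hkpre | hk'
      · exact hpre k hkpre
      · rw [hcons] at hk'
        rcases List.mem_cons.1 hk' with h | h
        · omega
        · exact absurd (hrlt k h) (by omega)
    · obtain ⟨j, hj, hkj, hle⟩ := hcov k (by omega) hk2 hks
      rcases List.mem_append.1 (hdec ▸ hj) with hjpre | hj'
      · exact le_trans (hpre j hjpre) hle
      · rw [hcons] at hj'
        rcases List.mem_cons.1 hj' with h | h
        · omega
        · exact absurd (hrlt j h) (by omega)

lemma StkL_step (hts : List Int) (i : Int) (s : List Int) (hinv : StkL hts i s) (h0 : 0 ≤ i) :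
    StkL hts (i+1) (i :: pvPop hts (PySem.List.pyGetD hts i 0) s) := by
  obtain ⟨hbnds, hpair, hcov⟩ := hinv
  obtain ⟨pre, hdec, hpre⟩ := pvPop_decomp hts (PySem.List.pyGetD hts i 0) s
  have hsub : ∀ j ∈ pvPop hts (PySem.List.pyGetD hts i 0) s, j ∈ s := by
    intro j hj; rw [hdec]; exact List.mem_append.2 (Or.inr hj)
  refine ⟨?_, ?_, ?_⟩
  · intro j hj
    rcases List.mem_cons.1 hj with h | h
    · omega
    · have := hbnds j (hsub j h); omega
  · rw [List.pairwise_cons]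
    refine ⟨fun j hj => (hbnds j (hsub j hj)).2, ?_⟩
    exact (List.pairwise_append.1 (hdec ▸ hpair)).2.1
  · intro k hk0 hk1 hknot
    have hkne : k ≠ i := fun h => hknot (h ▸ List.mem_cons_self)
    have hki : k < i := by omega
    by_cases hks : k ∈ s
    · rcases List.mem_append.1 (hdec ▸ hks) with hkpre | hk'
      · exact ⟨i, List.mem_cons_self, hki, hpre k hkpre⟩
      · exact absurd (List.mem_cons.2 (Or.inr hk')) hknot
    · obtain ⟨j, hj, hkj, hle⟩ := hcov k hk0 hki hks
      rcases List.mem_append.1 (hdec ▸ hj) with hjpre | hj'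
      · exact ⟨i, List.mem_cons_self, hki, le_trans (hpre j hjpre) hle⟩
      · exact ⟨j, List.mem_cons.2 (Or.inr hj'), hkj, hle⟩

lemma StkR_pop_IsNSR (hts : List Int) (i : Int) (s : List Int) (hinv : StkR hts (i+1) s)
    (hlen : i < (hts.length : Int)) :
    IsNSR hts i ((pvPop hts (PySem.List.pyGetD hts i 0) s).headD (hts.length : Int)) := by
  obtain ⟨hbnds, hpair, hcov⟩ := hinv
  obtain ⟨pre, hdec, hpre⟩ := pvPop_decomp hts (PySem.List.pyGetD hts i 0) s
  rcases pvPop_head hts (PySem.List.pyGetD hts i 0) s with hnil | ⟨t, r, hcons, hlt⟩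
  · rw [hnil, List.headD_nil]
    refine ⟨hlen, le_refl _, fun k hk1 hk2 => ?_, Or.inl rfl⟩
    rw [hnil, List.append_nil] at hdec
    by_cases hks : k ∈ s
    · exact hpre k (hdec ▸ hks)
    · obtain ⟨j, hj, hkj, hle⟩ := hcov k (by omega) hk2 hks
      exact le_trans (hpre j (hdec ▸ hj)) hle
  · rw [hcons, List.headD_cons]
    have hts_mem : t ∈ s := by rw [hdec, hcons]; simp
    have hbt := hbnds t hts_mem
    have hrlt : ∀ y ∈ r, t < y := by
      have := hdec ▸ hpair
      rw [hcons] at this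
      exact (List.pairwise_cons.1 (List.pairwise_append.1 this).2.1).1
    refine ⟨by omega, by omega, fun k hk1 hk2 => ?_, Or.inr hlt⟩
    by_cases hks : k ∈ s
    · rcases List.mem_append.1 (hdec ▸ hks) with hkpre | hk'
      · exact hpre k hkpre
      · rw [hcons] at hk'
        rcases List.mem_cons.1 hk' with h | h
        · omega
        · exact absurd (hrlt k h) (by omega)
    · obtain ⟨j, hj, hkj, hle⟩ := hcov k (by omega) (by omega) hks
      rcases List.mem_append.1 (hdec ▸ hj) with hjpre | hj'
      · exact le_trans (hpre j hjpre) hle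
      · rw [hcons] at hj'
        rcases List.mem_cons.1 hj' with h | h
        · omega
        · exact absurd (hrlt j h) (by omega)

lemma StkR_step (hts : List Int) (i : Int) (s : List Int) (hinv : StkR hts (i+1) s)
    (hlen : i < (hts.length : Int)) :
    StkR hts i (i :: pvPop hts (PySem.List.pyGetD hts i 0) s) := by
  obtain ⟨hbnds, hpair, hcov⟩ := hinv
  obtain ⟨pre, hdec, hpre⟩ := pvPop_decomp hts (PySem.List.pyGetD hts i 0) s
  have hsub : ∀ j ∈ pvPop hts (PySem.List.pyGetD hts i 0) s, j ∈ s := by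
    intro j hj; rw [hdec]; exact List.mem_append.2 (Or.inr hj)
  refine ⟨?_, ?_, ?_⟩
  · intro j hj
    rcases List.mem_cons.1 hj with h | h
    · omega
    · have := hbnds j (hsub j h); omega
  · rw [List.pairwise_cons]
    refine ⟨fun j hj => by have := (hbnds j (hsub j hj)).1; omega, ?_⟩
    exact (List.pairwise_append.1 (hdec ▸ hpair)).2.1
  · intro k hk0 hk1 hknot
    have hkne : k ≠ i := fun h => hknot (h ▸ List.mem_cons_self)
    have hki : i < k := by omega
    by_cases hks : k ∈ s
    · rcases List.mem_append.1 (hdec ▸ hks) with hkpre | hk'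
      · exact ⟨i, List.mem_cons_self, hki, hpre k hkpre⟩
      · exact absurd (List.mem_cons.2 (Or.inr hk')) hknot
    · obtain ⟨j, hj, hkj, hle⟩ := hcov k (by omega) hk1 hks
      rcases List.mem_append.1 (hdec ▸ hj) with hjpre | hj'
      · exact ⟨i, List.mem_cons_self, hki, le_trans (hpre j hjpre) hle⟩
      · exact ⟨j, List.mem_cons.2 (Or.inr hj'), hkj, hle⟩

def lsv (hts : List Int) : List Int :=
  ((PySem.List.pyRange 0 hts.length 1).foldl (pvStepL hts) ([], [])).2

def rsv (hts : List Int) : List Int :=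
  (((PySem.List.pyRange 0 hts.length 1).reverse).foldl (pvStepR hts hts.length) ([], [])).2.reverse

lemma leftPass_inv (hts : List Int) : ∀ m : Nat,
    StkL hts m (((List.range m).map (fun k : Nat => (k : Int))).foldl (pvStepL hts) ([], [])).1 ∧
    (((List.range m).map (fun k : Nat => (k : Int))).foldl (pvStepL hts) ([], [])).2.length = m ∧
    ∀ idx : Nat, idx < m →
      IsNSL hts idx ((((List.range m).map (fun k : Nat => (k : Int))).foldl (pvStepL hts) ([], [])).2.getD idx 0) := by
  intro m
  induction m with
  | zero =>
    refine ⟨⟨by simp, by simp, fun k hk0 hk1 _ => by simp at hk1; omega⟩, by simp, by omega⟩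
  | succ m ih =>
    have hrange : (List.range (m+1)).map (fun k : Nat => (k : Int)) =
        (List.range m).map (fun k : Nat => (k : Int)) ++ [(m : Int)] := by
      rw [List.range_succ]; simp
    rw [hrange, List.foldl_append, List.foldl_cons, List.foldl_nil]
    obtain ⟨hstk, hlen, hout⟩ := ih
    simp only [pvStepL]
    refine ⟨?_, ?_, ?_⟩
    · have := StkL_step hts (m : Int) _ hstk (by positivity)
      have hcast : ((m : Int) + 1) = ((m+1 : Nat) : Int) := by push_cast; ring
      rw [hcast] at this
      exact this
    · simp only [List.length_append, hlen, List.length_singleton]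
    · intro idx hidx
      rcases Nat.lt_or_ge idx m with hlt | hge
      · rw [List.getD_append _ _ _ _ (by omega)]
        exact hout idx hlt
      · have hidxm : idx = m := by omega
        subst hidxm
        rw [List.getD_append_right _ _ _ _ (by omega), hlen, Nat.sub_self]
        exact StkL_pop_IsNSL hts (idx : Int) _ hstk (by positivity)

lemma lsv_spec (hts : List Int) (idx : Nat) (h : idx < hts.length) :
    IsNSL hts idx ((lsv hts).getD idx 0) := by
  unfold lsv
  rw [PySem.List.pyRange_zero_natCast]
  exact (leftPass_inv hts hts.length).2.2 idx h

lemma rightPass_inv (hts : List Int) : ∀ d : Nat, d ≤ hts.length →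
    StkR hts (hts.length - d : Nat)
      ((((List.range' (hts.length - d) d).map (fun k : Nat => (k : Int))).reverse.foldl (pvStepR hts hts.length) ([], [])).1) ∧
    ((((List.range' (hts.length - d) d).map (fun k : Nat => (k : Int))).reverse.foldl (pvStepR hts hts.length) ([], [])).2.length = d) ∧
    ∀ idx : Nat, hts.length - d ≤ idx → idx < hts.length →
      IsNSR hts idx (((((List.range' (hts.length - d) d).map (fun k : Nat => (k : Int))).reverse.foldl (pvStepR hts hts.length) ([], [])).2).getD (hts.length - 1 - idx) 0) := by
  intro d
  induction d with
  | zero =>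
    intro _
    refine ⟨⟨by simp, by simp, fun k hk0 hk1 _ => by omega⟩, by simp, by omega⟩
  | succ d ih =>
    intro hd
    have hm : hts.length - (d+1) + 1 = hts.length - d := by omega
    have hrange : ((List.range' (hts.length - (d+1)) (d+1)).map (fun k : Nat => (k : Int))).reverse =
        ((List.range' (hts.length - d) d).map (fun k : Nat => (k : Int))).reverse ++ [((hts.length - (d+1) : Nat) : Int)] := by
      rw [List.range'_succ, hm]; simp
    rw [hrange, List.foldl_append, List.foldl_cons, List.foldl_nil]
    obtain ⟨hstk, hlen, hout⟩ := ih (by omega)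
    have hcast : ((hts.length - (d+1) : Nat) : Int) + 1 = ((hts.length - d : Nat) : Int) := by
      omega
    simp only [pvStepR]
    have hlenlt : ((hts.length - (d+1) : Nat) : Int) < (hts.length : Int) := by omega
    refine ⟨?_, ?_, ?_⟩
    · exact StkR_step hts _ _ (hcast ▸ hstk) hlenlt
    · simp only [List.length_append, hlen, List.length_singleton]
    · intro idx hge hidx
      rcases Nat.lt_or_ge (hts.length - (d+1)) idx with hlt | hge2
      · rw [List.getD_append _ _ _ _ (by omega)]
        exact hout idx (by omega) hidx
      · have hidxm : idx = hts.length - (d+1) := by omega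
        subst hidxm
        rw [List.getD_append_right _ _ _ _ (by omega), hlen, show hts.length - 1 - (hts.length - (d+1)) - d = 0 by omega]
        exact StkR_pop_IsNSR hts _ _ (hcast ▸ hstk) hlenlt

lemma rsv_spec (hts : List Int) (idx : Nat) (h : idx < hts.length) :
    IsNSR hts idx ((rsv hts).getD idx 0) := by
  unfold rsv
  rw [PySem.List.pyRange_zero_natCast, List.range_eq_range']
  obtain ⟨_, hlen, hout⟩ := rightPass_inv hts hts.length (le_refl _)
  rw [Nat.sub_self] at hlen hout
  rw [List.getD_eq_getElem?_getD, List.getElem?_reverse (by rw [hlen]; omega), hlen,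
    ← List.getD_eq_getElem?_getD]
  exact hout idx (by omega) h

-- ---- fold bookkeeping: both folds are a running max of a per-index value ----

lemma foldl_max_pull (l : List Int) : ∀ a b : Int, l.foldl max (max a b) = max a (l.foldl max b) := by
  induction l with
  | nil => intro a b; simp
  | cons y t ih =>
    intro a b
    simp only [List.foldl_cons]
    rw [max_assoc]
    exact ih a (max b y)

lemma foldl_max_merge (f g : Int → Int) (l : List Int) :
    ∀ c : Int, (l.map f).foldl max ((l.map g).foldl max c) =
      (l.map (fun i => max (g i) (f i))).foldl max c := by
  induction l with
  | nil => intro c; simp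
  | cons i t ih =>
    intro c
    simp only [List.map_cons, List.foldl_cons]
    rw [max_comm _ (f i), foldl_max_pull, ih (max c (g i))]
    conv_rhs => rw [show max c (max (g i) (f i)) = max (f i) (max c (g i)) by omega, foldl_max_pull]

lemma foldl_max_const (l : List Int) : ∀ c : Int, (∀ a ∈ l, a ≤ c) → l.foldl max c = c := by
  induction l with
  | nil => intro c _; rfl
  | cons y t ih =>
    intro c hall
    simp only [List.foldl_cons]
    rw [max_eq_left (hall y List.mem_cons_self)]
    exact ih c (fun a ha => hall a (List.mem_cons.2 (Or.inr ha)))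

lemma foldl_max_shape (l : List Int) (body : Int → Int → Int) (f : Int → Int)
    (hb : ∀ cur i, 0 ≤ cur → body cur i = max cur (f i)) :
    ∀ a : Int, 0 ≤ a → l.foldl body a = (l.map f).foldl max a := by
  induction l with
  | nil => intro a _; simp
  | cons i t ih =>
    intro a ha
    simp only [List.foldl_cons, List.map_cons]
    rw [hb a i ha]
    exact ih (max a (f i)) (le_trans ha (le_max_left _ _))

-- per-index values: A's modification-loop candidates, the base candidate, B's candidates,
-- and A's neighbour-matching candidate in B's run form
def fAv (hts : List Int) (x : Int) (ls rs : List Int) (i : Int) : Int :=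
  max (if x > PySem.List.pyGetD hts i 0 then
        (pvExpandR hts x (PySem.List.pyGetD rs i 0) hts.length (i+1) i -
          pvExpandL hts x (PySem.List.pyGetD ls i 0) hts.length (i-1) i + 1) * x
      else -1)
    (if (0 < i ∧ i < (hts.length : Int) - 1) ∧
        (min (PySem.List.pyGetD hts (i-1) 0) (PySem.List.pyGetD hts (i+1) 0) > PySem.List.pyGetD hts i 0 ∧
          min (PySem.List.pyGetD hts (i-1) 0) (PySem.List.pyGetD hts (i+1) 0) ≤ x) then
        pvCountR hts (min (PySem.List.pyGetD hts (i-1) 0) (PySem.List.pyGetD hts (i+1) 0)) hts.length (hts.length+1) (i+1)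
          (pvCountL hts (min (PySem.List.pyGetD hts (i-1) 0) (PySem.List.pyGetD hts (i+1) 0)) (hts.length+1) i 0) *
          min (PySem.List.pyGetD hts (i-1) 0) (PySem.List.pyGetD hts (i+1) 0)
      else -1)

def gBv (hts ls rs : List Int) (i : Int) : Int :=
  (PySem.List.pyGetD rs i 0 - PySem.List.pyGetD ls i 0 - 1) * PySem.List.pyGetD hts i 0

def fBv (hts : List Int) (x : Int) (i : Int) : Int :=
  max ((altRunL hts (PySem.List.pyGetD hts i 0) (i-1) (hts.length+1) 0 + 1 +
          altRunR hts (PySem.List.pyGetD hts i 0) (i+1) (hts.length+1) 0) * PySem.List.pyGetD hts i 0)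
    (if x > PySem.List.pyGetD hts i 0 then
      (altRunL hts x (i-1) (hts.length+1) 0 + 1 + altRunR hts x (i+1) (hts.length+1) 0) * x
    else -1)

def c3v (hts : List Int) (x : Int) (i : Int) : Int :=
  if (0 < i ∧ i < (hts.length : Int) - 1) ∧
      (min (PySem.List.pyGetD hts (i-1) 0) (PySem.List.pyGetD hts (i+1) 0) > PySem.List.pyGetD hts i 0 ∧
        min (PySem.List.pyGetD hts (i-1) 0) (PySem.List.pyGetD hts (i+1) 0) ≤ x) then
    altRunR hts (min (PySem.List.pyGetD hts (i-1) 0) (PySem.List.pyGetD hts (i+1) 0)) (i+1) (hts.length+1) 0 *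
      min (PySem.List.pyGetD hts (i-1) 0) (PySem.List.pyGetD hts (i+1) 0)
  else -1

lemma base_width_eq (hts : List Int) (i L R : Int) (hL : IsNSL hts i L) (hR : IsNSR hts i R)
    (h0 : 0 ≤ i) (h1 : i < (hts.length : Int)) :
    R - L - 1 =
      altRunL hts (PySem.List.pyGetD hts i 0) (i-1) (hts.length+1) 0 + 1 +
        altRunR hts (PySem.List.pyGetD hts i 0) (i+1) (hts.length+1) 0 := by
  obtain ⟨hL1, hL2, hL3, hL4⟩ := hL
  obtain ⟨hR1, hR2, hR3, hR4⟩ := hR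
  have hrunL := altRunL_run hts (PySem.List.pyGetD hts i 0) (i-1) L
    ⟨hL1, by omega, fun k hk1 hk2 => hL3 k hk1 (by omega), hL4⟩
    (hts.length+1) 0 (le_refl 0) (by omega) (by omega)
  have hrunR := altRunR_run hts (PySem.List.pyGetD hts i 0) (i+1) R
    ⟨by omega, hR2, fun k hk1 hk2 => hR3 k (by omega) hk2, hR4⟩
    (hts.length+1) 0 (le_refl 0) (by omega) (by omega)
  rw [hrunL, hrunR]
  omega

lemma cand1_eq (hts : List Int) (x i L R : Int) (hL : IsNSL hts i L) (hR : IsNSR hts i R)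
    (h0 : 0 ≤ i) (h1 : i < (hts.length : Int)) (hx : PySem.List.pyGetD hts i 0 < x) :
    (pvExpandR hts x R hts.length (i+1) i - pvExpandL hts x L hts.length (i-1) i + 1) * x =
      (altRunL hts x (i-1) (hts.length+1) 0 + 1 + altRunR hts x (i+1) (hts.length+1) 0) * x := by
  obtain ⟨hL1, hL2, hL3, hL4⟩ := hL
  obtain ⟨hR1, hR2, hR3, hR4⟩ := hR
  obtain ⟨bL, hbL⟩ := exists_LBnd hts x (i-1) (by omega)
  obtain ⟨hbL1, hbL2, hbL3, hbL4⟩ := hbL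
  have hLbL : L ≤ bL := by
    by_contra hcon
    have hxL : x ≤ PySem.List.pyGetD hts L 0 := hbL3 L (by omega) (by omega)
    rcases hL4 with h | h
    · omega
    · omega
  have hstopL : bL = L ∨ PySem.List.pyGetD hts bL 0 < x := by
    rcases hbL4 with h | h
    · left; omega
    · right; exact h
  have hEL := pvExpandL_run hts x L bL hLbL hstopL hts.length (i-1) (by omega)
    (fun k hk1 hk2 => hbL3 k hk1 hk2) (by omega)
  rw [show (i - 1 + 1) = i by ring] at hEL
  obtain ⟨bR, hbR⟩ := exists_RBnd hts x (i+1) (by omega)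
  obtain ⟨hbR1, hbR2, hbR3, hbR4⟩ := hbR
  have hbRR : bR ≤ R := by
    by_contra hcon
    have hxR : x ≤ PySem.List.pyGetD hts R 0 := hbR3 R (by omega) (by omega)
    rcases hR4 with h | h
    · omega
    · omega
  have hstopR : bR = R ∨ PySem.List.pyGetD hts bR 0 < x := by
    rcases hbR4 with h | h
    · left; omega
    · right; exact h
  have hER := pvExpandR_run hts x R bR hbRR hstopR hts.length (i+1) (by omega)
    (fun k hk1 hk2 => hbR3 k hk1 hk2) (by omega)
  rw [show (i + 1 - 1) = i by ring] at hER
  have hrunL := altRunL_run hts x (i-1) bL ⟨hbL1, hbL2, hbL3, hbL4⟩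
    (hts.length+1) 0 (le_refl 0) (by omega) (by omega)
  have hrunR := altRunR_run hts x (i+1) bR ⟨hbR1, hbR2, hbR3, hbR4⟩
    (hts.length+1) 0 (le_refl 0) (by omega) (by omega)
  rw [hEL, hER, hrunL, hrunR]
  congr 1
  omega

lemma cand2_eq (hts : List Int) (i nh : Int) (h0 : 0 < i) (h1 : i < (hts.length : Int) - 1)
    (hnh : PySem.List.pyGetD hts i 0 < nh) :
    pvCountR hts nh (hts.length : Int) (hts.length+1) (i+1) (pvCountL hts nh (hts.length+1) i 0) =
      altRunR hts nh (i+1) (hts.length+1) 0 := by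
  have hw0 : pvCountL hts nh (hts.length+1) i 0 = 0 := by
    rw [pvCountL, if_neg (fun hcon => by omega)]
  obtain ⟨b, hb⟩ := exists_RBnd hts nh (i+1) (by omega)
  obtain ⟨hb1, hb2, hb3, hb4⟩ := hb
  have hcr := pvCountR_run hts nh b hb2 hb4 (hts.length+1) (i+1) 0 (by omega)
    (fun k hk1 hk2 => hb3 k hk1 hk2) (by omega)
  have hrr := altRunR_run hts nh (i+1) b ⟨hb1, hb2, hb3, hb4⟩
    (hts.length+1) 0 (le_refl 0) (by omega) (by omega)
  rw [hw0, hcr, hrr]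
  omega

lemma A_as_max (hts : List Int) (x : Int) :
    max_rectangle_area hts x =
      ((PySem.List.pyRange 0 hts.length 1).map (fAv hts x (lsv hts) (rsv hts))).foldl max
        (((PySem.List.pyRange 0 hts.length 1).map (gBv hts (lsv hts) (rsv hts))).foldl max 0) := by
  have h1 : max_rectangle_area hts x =
      (PySem.List.pyRange 0 hts.length 1).foldl (fun cur i =>
        let left := PySem.List.pyGetD (lsv hts) i 0
        let right := PySem.List.pyGetD (rsv hts) i 0
        let hi := PySem.List.pyGetD hts i 0
        let cur1 :=
          if x > hi then
            let pl := pvExpandL hts x left hts.length (i-1) i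
            let pr := pvExpandR hts x right hts.length (i+1) i
            max cur ((pr - pl + 1) * x)
          else cur
        if 0 < i ∧ i < (hts.length : Int) - 1 then
          let nh := min (PySem.List.pyGetD hts (i-1) 0) (PySem.List.pyGetD hts (i+1) 0)
          if nh > hi ∧ nh ≤ x then
            let w := pvCountL hts nh (hts.length+1) i 0
            let w2 := pvCountR hts nh hts.length (hts.length+1) (i+1) w
            max cur1 (w2 * nh)
          else cur1
        else cur1)
        ((PySem.List.pyRange 0 hts.length 1).foldl (fun m i => max m (gBv hts (lsv hts) (rsv hts) i)) 0) := rfl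
  rw [h1, foldl_max_shape _ _ (gBv hts (lsv hts) (rsv hts)) (fun cur i _ => rfl) 0 (le_refl 0)]
  refine foldl_max_shape _ _ _ ?_ _ (PySem.List.le_foldl_max _ 0).1
  intro cur i hcur
  simp only [fAv, gt_iff_lt]
  split_ifs <;> omega

lemma B_as_max (hts : List Int) (x : Int) :
    max_rectangle_area_alt hts x = ((PySem.List.pyRange 0 hts.length 1).map (fBv hts x)).foldl max 0 := by
  refine foldl_max_shape _ _ _ ?_ 0 (le_refl 0)
  intro cur i hcur
  simp only [fBv, gt_iff_lt]
  split_ifs <;> omega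

lemma pointwise_eq (hts : List Int) (x i : Int) (h0 : 0 ≤ i) (h1 : i < (hts.length : Int)) :
    max (gBv hts (lsv hts) (rsv hts) i) (fAv hts x (lsv hts) (rsv hts) i) =
      max (fBv hts x i) (c3v hts x i) := by
  lift i to Nat using h0 with idx
  have hidx : idx < hts.length := by exact_mod_cast h1
  have hL := lsv_spec hts idx hidx
  have hR := rsv_spec hts idx hidx
  simp only [gBv, fAv, fBv, c3v, gt_iff_lt, PySem.List.pyGetD_natCast (lsv hts), PySem.List.pyGetD_natCast (rsv hts)]
  have e1 : ((rsv hts).getD idx 0 - (lsv hts).getD idx 0 - 1) * PySem.List.pyGetD hts (idx : Int) 0 =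
      (altRunL hts (PySem.List.pyGetD hts (idx : Int) 0) ((idx : Int)-1) (hts.length+1) 0 + 1 +
        altRunR hts (PySem.List.pyGetD hts (idx : Int) 0) ((idx : Int)+1) (hts.length+1) 0) *
        PySem.List.pyGetD hts (idx : Int) 0 := by
    rw [base_width_eq hts (idx : Int) _ _ hL hR (by positivity) h1]
  rw [e1]
  by_cases hc1 : PySem.List.pyGetD hts (idx : Int) 0 < x
  · rw [if_pos hc1, if_pos hc1,
      cand1_eq hts x (idx : Int) _ _ hL hR (by positivity) h1 hc1]
    by_cases hc2 : (0 < (idx : Int) ∧ (idx : Int) < (hts.length : Int) - 1) ∧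
        (PySem.List.pyGetD hts ((idx : Int)-1) 0 ⊓ PySem.List.pyGetD hts ((idx : Int)+1) 0 > PySem.List.pyGetD hts (idx : Int) 0 ∧
          PySem.List.pyGetD hts ((idx : Int)-1) 0 ⊓ PySem.List.pyGetD hts ((idx : Int)+1) 0 ≤ x)
    · rw [if_pos hc2, if_pos hc2, cand2_eq hts (idx : Int) _ hc2.1.1 hc2.1.2 hc2.2.1]
      omega
    · rw [if_neg hc2, if_neg hc2]
      omega
  · rw [if_neg hc1, if_neg hc1]
    by_cases hc2 : (0 < (idx : Int) ∧ (idx : Int) < (hts.length : Int) - 1) ∧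
        (PySem.List.pyGetD hts ((idx : Int)-1) 0 ⊓ PySem.List.pyGetD hts ((idx : Int)+1) 0 > PySem.List.pyGetD hts (idx : Int) 0 ∧
          PySem.List.pyGetD hts ((idx : Int)-1) 0 ⊓ PySem.List.pyGetD hts ((idx : Int)+1) 0 ≤ x)
    · rw [if_pos hc2, if_pos hc2, cand2_eq hts (idx : Int) _ hc2.1.1 hc2.1.2 hc2.2.1]
      omega
    · rw [if_neg hc2, if_neg hc2]
      omega

-- minimum bar of a nonempty index segment
lemma exists_argmin (hts : List Int) : ∀ d : Nat, ∀ s b : Int, (b - s).toNat = d → s < b →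
    ∃ m, s ≤ m ∧ m < b ∧ ∀ k, s ≤ k → k < b → PySem.List.pyGetD hts m 0 ≤ PySem.List.pyGetD hts k 0 := by
  intro d
  induction d with
  | zero => intro s b hd hsb; omega
  | succ d ih =>
    intro s b hd hsb
    by_cases hsb1 : s + 1 < b
    · obtain ⟨m, hm1, hm2, hm3⟩ := ih (s+1) b (by omega) hsb1
      by_cases hc : PySem.List.pyGetD hts s 0 ≤ PySem.List.pyGetD hts m 0
      · refine ⟨s, le_refl s, by omega, fun k hk1 hk2 => ?_⟩
        rcases eq_or_lt_of_le hk1 with h | h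
        · rw [← h]
        · exact le_trans hc (hm3 k (by omega) hk2)
      · refine ⟨m, by omega, hm2, fun k hk1 hk2 => ?_⟩
        rcases eq_or_lt_of_le hk1 with h | h
        · rw [← h]; omega
        · exact hm3 k (by omega) hk2
    · refine ⟨s, le_refl s, hsb, fun k hk1 hk2 => ?_⟩
      have : k = s := by omega
      rw [this]

-- A's neighbour-matching candidate never beats B's base maximum: the run of bars ≥ nh to the
-- right of i is covered by the plain rectangle through that run's minimum bar
lemma c3_dominated (hts : List Int) (x i : Int) :
    c3v hts x i ≤ ((PySem.List.pyRange 0 hts.length 1).map (fBv hts x)).foldl max 0 := by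
  have hF0 : (0 : Int) ≤ ((PySem.List.pyRange 0 hts.length 1).map (fBv hts x)).foldl max 0 :=
    (PySem.List.le_foldl_max _ 0).1
  unfold c3v
  split_ifs with hc
  · obtain ⟨⟨hi0, hi1⟩, hnh, hnx⟩ := hc
    obtain ⟨b, hb1, hb2, hb3, hb4⟩ :=
      exists_RBnd hts (min (PySem.List.pyGetD hts (i-1) 0) (PySem.List.pyGetD hts (i+1) 0)) (i+1) (by omega)
    have hrr := altRunR_run hts _ (i+1) b ⟨hb1, hb2, hb3, hb4⟩ (hts.length+1) 0 (le_refl 0) (by omega) (by omega)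
    rw [hrr]
    have hbge : i + 2 ≤ b := by
      by_contra hcon
      have hbi : b = i + 1 := by omega
      rcases hb4 with h | h
      · omega
      · have : min (PySem.List.pyGetD hts (i-1) 0) (PySem.List.pyGetD hts (i+1) 0) ≤ PySem.List.pyGetD hts (i+1) 0 :=
          min_le_right _ _
        rw [hbi] at h
        omega
    by_cases hnhpos : 0 < min (PySem.List.pyGetD hts (i-1) 0) (PySem.List.pyGetD hts (i+1) 0)
    · obtain ⟨m, hm1, hm2, hm3⟩ := exists_argmin hts (b - (i+1)).toNat (i+1) b rfl (by omega)
      have hmnh : min (PySem.List.pyGetD hts (i-1) 0) (PySem.List.pyGetD hts (i+1) 0) ≤ PySem.List.pyGetD hts m 0 :=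
        hb3 m hm1 hm2
      -- run of bars ≥ heights[m] around m covers at least [i+1, b)
      obtain ⟨bL, hL1, hL2, hL3, hL4⟩ := exists_LBnd hts (PySem.List.pyGetD hts m 0) (m-1) (by omega)
      have hrl := altRunL_run hts (PySem.List.pyGetD hts m 0) (m-1) bL ⟨hL1, hL2, hL3, hL4⟩
        (hts.length+1) 0 (le_refl 0) (by omega) (by omega)
      have hbLi : bL ≤ i := by
        by_contra hcon
        have hmem : PySem.List.pyGetD hts m 0 ≤ PySem.List.pyGetD hts bL 0 := hm3 bL (by omega) (by omega)
        rcases hL4 with h | h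
        · omega
        · omega
      obtain ⟨bR, hR1, hR2, hR3, hR4⟩ := exists_RBnd hts (PySem.List.pyGetD hts m 0) (m+1) (by omega)
      have hrr2 := altRunR_run hts (PySem.List.pyGetD hts m 0) (m+1) bR ⟨hR1, hR2, hR3, hR4⟩
        (hts.length+1) 0 (le_refl 0) (by omega) (by omega)
      have hbRb : b ≤ bR := by
        by_contra hcon
        have hmem : PySem.List.pyGetD hts m 0 ≤ PySem.List.pyGetD hts bR 0 := hm3 bR (by omega) (by omega)
        rcases hR4 with h | h
        · omega
        · omega
      have hprod : (b - (i+1)) * min (PySem.List.pyGetD hts (i-1) 0) (PySem.List.pyGetD hts (i+1) 0) ≤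
          (altRunL hts (PySem.List.pyGetD hts m 0) (m-1) (hts.length+1) 0 + 1 +
            altRunR hts (PySem.List.pyGetD hts m 0) (m+1) (hts.length+1) 0) * PySem.List.pyGetD hts m 0 := by
        rw [hrl, hrr2]
        exact mul_le_mul (by omega) hmnh (by omega) (by omega)
      have hbase : (altRunL hts (PySem.List.pyGetD hts m 0) (m-1) (hts.length+1) 0 + 1 +
            altRunR hts (PySem.List.pyGetD hts m 0) (m+1) (hts.length+1) 0) * PySem.List.pyGetD hts m 0 ≤
          fBv hts x m := le_max_left _ _
      have hmemR : fBv hts x m ∈ (PySem.List.pyRange 0 hts.length 1).map (fBv hts x) :=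
        List.mem_map_of_mem (PySem.List.mem_pyRange_one.2 ⟨by omega, by omega⟩)
      have hfold := (PySem.List.le_foldl_max ((PySem.List.pyRange 0 hts.length 1).map (fBv hts x)) 0).2 _ hmemR
      omega
    · have hle0 : (b - (i+1)) * min (PySem.List.pyGetD hts (i-1) 0) (PySem.List.pyGetD hts (i+1) 0) ≤ 0 :=
        mul_nonpos_of_nonneg_of_nonpos (by omega) (by omega)
      omega
  · omega

-- ===== VERDICT (by name: the statement is the Claim_ definition above) =====
theorem max_rectangle_area_spec : Claim_equal_max_rectangle_area := by
  intro hts x _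
  unfold Spec_max_rectangle_area
  rw [A_as_max, B_as_max, foldl_max_merge,
    List.map_congr_left (fun i hi => by
      rcases PySem.List.mem_pyRange_one.1 hi with ⟨h0, h1⟩
      exact pointwise_eq hts x i h0 h1),
    ← foldl_max_merge (c3v hts x) (fBv hts x)]
  exact foldl_max_const _ _ (fun a ha => by
    obtain ⟨i, hi, rfl⟩ := List.mem_map.1 ha
    exact c3_dominated hts x i)
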